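-- pv_equiv track=rewrite | github.com/efreim/UJ-Python | 11/lists.py | almost_sorted_list
-- ===== SOURCE A (Python) =====
-- def almost_sorted_list(n):
--     my_list = []
--     for item in range(0, n):
--         if item % 3 == 0:
--             my_list.insert(item, item)
--             tmp = my_list[item]
--             my_list[item] = my_list[item - 1]
--             my_list[item - 1] = tmp
--         else:
--             my_list.insert(item, item)
--     return my_list
-- ===== SOURCE B (Python) =====
-- def almost_sorted_list(n):
--     return [i + 1 if i % 3 == 2 and i + 1 < n
--             else i - 1 if i % 3 == 0 and i >= 3
--             else i
--             for i in range(n)]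
-- ===== Notes on version B (the rewrite author's own statement) =====
-- stated objective: simpler
-- what changed: Replaces the incremental build-then-swap loop (insert plus a three-statement element swap at every multiple of 3) by a single list comprehension computing each element's value directly from its index in closed form.
import Mathlib
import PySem

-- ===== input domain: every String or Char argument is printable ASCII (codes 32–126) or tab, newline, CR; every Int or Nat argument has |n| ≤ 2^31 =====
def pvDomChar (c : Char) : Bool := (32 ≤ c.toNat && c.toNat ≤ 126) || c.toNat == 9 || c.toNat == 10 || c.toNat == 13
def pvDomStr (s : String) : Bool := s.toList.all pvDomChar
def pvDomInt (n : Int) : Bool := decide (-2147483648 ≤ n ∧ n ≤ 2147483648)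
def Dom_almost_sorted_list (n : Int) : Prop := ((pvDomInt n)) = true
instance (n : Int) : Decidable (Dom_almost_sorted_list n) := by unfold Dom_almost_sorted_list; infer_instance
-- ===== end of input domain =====

-- B replaces A's build-then-swap loop by a closed-form comprehension over the index; objective: simpler.

-- ===== PORT A =====
-- loop body of A's 'for item in range(0, n)'
def pvStepA (my_list : List Int) (item : Int) : List Int :=
  if PySem.Int.mod item 3 = 0 then
    let l1 := PySem.List.insert my_list item item
    let tmp := PySem.List.pyGetD l1 item 0
    let l2 := PySem.List.pySetD l1 item (PySem.List.pyGetD l1 (item - 1) 0)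
    PySem.List.pySetD l2 (item - 1) tmp
  else
    PySem.List.insert my_list item item

def almost_sorted_list (n : Int) : List Int :=
  (PySem.List.pyRange 0 n 1).foldl pvStepA []

-- ===== PORT B =====
-- value of the comprehension at index i
def pvAltVal (n i : Int) : Int :=
  if PySem.Int.mod i 3 = 2 ∧ i + 1 < n then i + 1
  else if PySem.Int.mod i 3 = 0 ∧ 3 ≤ i then i - 1
  else i

def almost_sorted_list_alt (n : Int) : List Int :=
  (PySem.List.pyRange 0 n 1).map (pvAltVal n)

-- ===== PRECONDITION & SPEC =====
def Spec_almost_sorted_list (n : Int) (out : List Int) : Prop := out = almost_sorted_list_alt n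
instance (n : Int) (out : List Int) : Decidable (Spec_almost_sorted_list n out) := by unfold Spec_almost_sorted_list; infer_instance

-- ===== CLAIM (what is proved, stated in full; the proofs are below) =====
def Claim_equal_almost_sorted_list : Prop := ∀ (n : Int), Dom_almost_sorted_list n → Spec_almost_sorted_list n (almost_sorted_list n)

-- ===== LEMMAS AND PROOFS =====

-- a value below the cutoff does not change when the cutoff moves from m to m + 1
lemma pvValCongr (m i : Int) (hi : i < m) (hne : PySem.Int.mod i 3 = 2 → i + 1 ≠ m) :
    pvAltVal (m + 1) i = pvAltVal m i := by
  unfold pvAltVal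
  have h3 : PySem.Int.mod i 3 = i % 3 := PySem.Int.mod_eq_emod_of_pos (by omega)
  rw [h3]
  split_ifs <;> omega

-- the loop invariant: after the first m iterations A's list is B's list for n = m
lemma pvLoop (m : Nat) :
    (PySem.List.pyRange 0 (m : Int) 1).foldl pvStepA []
      = (PySem.List.pyRange 0 (m : Int) 1).map (pvAltVal ((m : Int))) := by
  induction m with
  | zero => decide
  | succ m ih =>
    by_cases hm3 : m < 3
    · interval_cases m <;> decide
    push_cast
    rw [PySem.List.pyRange_one_succ_right (by positivity), List.foldl_append, List.map_append, ih]
    set L := (PySem.List.pyRange 0 (m : Int) 1).map (pvAltVal ((m : Int))) with hLdef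
    have hL : L.length = m := by simp [hLdef, PySem.List.length_pyRange_one]
    have hlen : ((m : Int)) = PySem.List.len L := by simp [PySem.List.len_eq, hL]
    have hmodi : PySem.Int.mod ((m : Int)) 3 = (m : Int) % 3 :=
      PySem.Int.mod_eq_emod_of_pos (by omega)
    simp only [List.foldl_cons, List.foldl_nil, List.map_cons, List.map_nil]
    simp only [pvStepA]
    have hins : PySem.List.insert L ((m : Int)) ((m : Int)) = L ++ [(m : Int)] := by
      have h := PySem.List.insert_len L ((m : Int)); rw [← hlen] at h; exact h
    by_cases h0 : PySem.Int.mod ((m : Int)) 3 = 0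
    · -- swap step: positions m and m-1 are exchanged
      have h0' : (m : Int) % 3 = 0 := by rw [← hmodi]; exact h0
      set K := m - 1 with hKdef
      have hmK : m = K + 1 := by omega
      have hK : ((m : Int)) - 1 = ((K : Nat) : Int) := by omega
      rw [if_pos h0, hins]
      have hget1 : PySem.List.pyGetD (L ++ [(m : Int)]) ((m : Int)) 0 = (m : Int) := by
        rw [hlen, PySem.List.len_eq]
        simp [List.getD_eq_getElem?_getD]
      have hget2 : PySem.List.pyGetD (L ++ [(m : Int)]) ((m : Int) - 1) 0 = (m : Int) - 1 := by
        rw [hK, PySem.List.pyGetD_natCast, List.getD_eq_getElem?_getD,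
          List.getElem?_append_left (by omega), ← List.getD_eq_getElem?_getD, hLdef]
        have h := PySem.List.pyGetD_map_pyRange (pvAltVal ((m : Int))) m K 0 (by omega)
        rw [PySem.List.pyGetD_natCast] at h
        rw [h]
        unfold pvAltVal
        have h3 : PySem.Int.mod ((K : Nat) : Int) 3 = ((K : Nat) : Int) % 3 :=
          PySem.Int.mod_eq_emod_of_pos (by omega)
        rw [h3]
        split_ifs <;> omega
      have hset1 : PySem.List.pySetD (L ++ [(m : Int)]) ((m : Int)) ((m : Int) - 1)
          = L ++ [(m : Int) - 1] := by
        rw [hK, PySem.List.pySetD_natCast, ← hL]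
        simp
      have hsplitm : PySem.List.pyRange 0 ((m : Int)) 1
          = PySem.List.pyRange 0 ((K : Nat) : Int) 1 ++ [((K : Nat) : Int)] := by
        rw [show ((m : Int)) = ((K : Nat) : Int) + 1 by omega]
        exact PySem.List.pyRange_one_succ_right (by positivity)
      set L' := (PySem.List.pyRange 0 ((K : Nat) : Int) 1).map (pvAltVal ((m : Int))) with hL'def
      have hL' : L'.length = K := by simp [hL'def, PySem.List.length_pyRange_one]
      have hLsplit : L = L' ++ [((K : Nat) : Int)] := by
        rw [hLdef, hsplitm, List.map_append, hL'def]
        simp only [List.map_cons, List.map_nil]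
        congr 2
        unfold pvAltVal
        have h3 : PySem.Int.mod ((K : Nat) : Int) 3 = ((K : Nat) : Int) % 3 :=
          PySem.Int.mod_eq_emod_of_pos (by omega)
        rw [h3]
        split_ifs <;> omega
      have hset2 : PySem.List.pySetD (L ++ [(m : Int) - 1]) ((m : Int) - 1) ((m : Int))
          = L' ++ [(m : Int), ((K : Nat) : Int)] := by
        rw [hK, PySem.List.pySetD_natCast, hLsplit, List.append_assoc,
          List.set_append_right _ _ (by omega), hL']
        simp
      rw [hget1, hget2, hset1, hset2]
      have hv1 : pvAltVal ((m : Int) + 1) ((K : Nat) : Int) = (m : Int) := by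
        unfold pvAltVal
        have h3 : PySem.Int.mod ((K : Nat) : Int) 3 = ((K : Nat) : Int) % 3 :=
          PySem.Int.mod_eq_emod_of_pos (by omega)
        rw [h3]
        split_ifs <;> omega
      have hv2 : pvAltVal ((m : Int) + 1) ((m : Int)) = (m : Int) - 1 := by
        unfold pvAltVal
        rw [hmodi]
        split_ifs <;> omega
      have hmap : (PySem.List.pyRange 0 ((K : Nat) : Int) 1).map (pvAltVal ((m : Int) + 1)) = L' := by
        rw [hL'def]
        apply List.map_congr_left
        intro i himem
        have hmem := (PySem.List.mem_pyRange_one).1 himem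
        exact pvValCongr _ _ (by omega) (by intro _; omega)
      rw [hsplitm, List.map_append, hmap]
      simp only [List.map_cons, List.map_nil, List.append_assoc, hv1, hv2]
      rw [hK]
      simp
    · -- plain append step
      have h0' : ¬ ((m : Int) % 3 = 0) := by rw [← hmodi]; exact h0
      rw [if_neg h0, hins]
      have hv : pvAltVal ((m : Int) + 1) ((m : Int)) = (m : Int) := by
        unfold pvAltVal
        rw [hmodi]
        split_ifs <;> omega
      have hmap : (PySem.List.pyRange 0 ((m : Int)) 1).map (pvAltVal ((m : Int) + 1)) = L := by
        rw [hLdef]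
        apply List.map_congr_left
        intro i himem
        have hmem := (PySem.List.mem_pyRange_one).1 himem
        have h3 : PySem.Int.mod i 3 = i % 3 := PySem.Int.mod_eq_emod_of_pos (by omega)
        refine pvValCongr _ _ (by omega) ?_
        intro h2 habs
        rw [h3] at h2
        omega
      rw [hmap, hv]

-- ===== VERDICT (by name: the statement is the Claim_ definition above) =====
theorem almost_sorted_list_spec : Claim_equal_almost_sorted_list := by
  intro n _
  unfold Spec_almost_sorted_list almost_sorted_list almost_sorted_list_alt
  by_cases h : 0 < n
  · have hn : n = ((n.toNat : Nat) : Int) := by omega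
    rw [hn]; exact pvLoop n.toNat
  · rw [PySem.List.pyRange_one_eq_nil (by omega)]; rfl
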